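-- pv_equiv track=rewrite | github.com/tribbin/Delft3D-dependabot-test | ci/python/ci_tools/dimrset_delivery/common_utils.py | get_tag_from_build_info
-- ===== SOURCE A (Python) =====
-- from typing import Optional
--
-- def get_tag_from_build_info(current_build_info: dict) -> tuple:
--     """
--     Extract tag information from build info.
--
--     Parameters
--     ----------
--     current_build_info : dict
--         Build information dictionary from TeamCity.
--
--     Returns
--     -------
--     tuple
--         Tuple containing version numbers (major, minor, patch).
--     """
--     current_tag_name = (0, 0, 0)
--     tags = current_build_info.get("tags", {}).get("tag", [])
--     for tag in tags:
--         tag_name = tag.get("name")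
--         if tag_name and tag_name.startswith("DIMRset_"):
--             parsed_version = parse_version(tag_name)
--             if parsed_version is not None:
--                 current_tag_name = parsed_version
--     return current_tag_name
--
-- def parse_version(tag: str) -> Optional[tuple]:
--     """
--     Parse version string from tag.
--
--     Parameters
--     ----------
--     tag : str
--         Tag string to parse (e.g., 'DIMRset_1.2.3').
--
--     Returns
--     -------
--     Optional[tuple]
--         Tuple of version numbers (major, minor, patch) or None if parsing fails.
--     """
--     if tag and tag.startswith("DIMRset_"):
--         try:
--             return tuple(map(int, tag[len("DIMRset_") :].split(".")))
--         except ValueError: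
--             return None
--     return None
-- ===== SOURCE B (Python) =====
-- from typing import Optional
--
--
-- def get_tag_from_build_info(current_build_info: dict) -> tuple:
--     """Return the last valid DIMRset version tuple, scanning the tags in
--     reverse and returning at the first hit instead of overwriting an
--     accumulator across the whole list."""
--     tags = current_build_info.get("tags", {}).get("tag", [])
--     for tag in reversed(tags):
--         tag_name = tag.get("name")
--         if tag_name and tag_name.startswith("DIMRset_"):
--             parsed_version = parse_version(tag_name)
--             if parsed_version is not None:
--                 return parsed_version
--     return (0, 0, 0)
--
--
-- def parse_version(tag: str) -> Optional[tuple]: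
--     if tag and tag.startswith("DIMRset_"):
--         try:
--             return tuple(map(int, tag[len("DIMRset_"):].split(".")))
--         except ValueError:
--             return None
--     return None
-- ===== Notes on version B (the rewrite author's own statement) =====
-- stated objective: simpler
-- what changed: The scan-all-and-overwrite accumulator loop is replaced by an early-exit search over the reversed tag list that returns the first parseable DIMRset tag; parse_version is unchanged.
import Mathlib
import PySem

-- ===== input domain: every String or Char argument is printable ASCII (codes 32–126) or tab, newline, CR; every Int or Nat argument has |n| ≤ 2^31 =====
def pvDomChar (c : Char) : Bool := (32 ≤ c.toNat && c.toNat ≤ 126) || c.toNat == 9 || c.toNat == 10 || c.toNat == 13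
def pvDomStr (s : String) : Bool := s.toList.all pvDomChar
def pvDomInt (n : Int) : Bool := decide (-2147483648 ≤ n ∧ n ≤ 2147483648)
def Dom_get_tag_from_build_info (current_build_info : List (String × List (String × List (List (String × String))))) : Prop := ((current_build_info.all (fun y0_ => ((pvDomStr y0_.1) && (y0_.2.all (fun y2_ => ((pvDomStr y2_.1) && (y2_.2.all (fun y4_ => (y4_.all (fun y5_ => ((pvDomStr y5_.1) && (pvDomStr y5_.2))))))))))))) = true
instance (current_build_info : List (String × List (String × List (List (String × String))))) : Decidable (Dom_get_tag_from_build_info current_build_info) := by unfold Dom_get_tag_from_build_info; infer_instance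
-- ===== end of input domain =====

-- B replaces A's scan-all-and-overwrite accumulator loop by an early-exit search
-- over the reversed tag list (simpler decomposition; same return value).


-- ===== PORT A =====
-- shared helper: Python's parse_version (identical in Source A and Source B)
def pvParseVersion (tag : String) : Option (List Int) :=
  if tag ≠ "" ∧ PySem.Str.startswith tag "DIMRset_" then
    -- tuple(map(int, tag[len("DIMRset_"):].split("."))): ValueError on any part → none
    (PySem.Chars.splitOn (PySem.Str.slice tag (some 8) none).toList ['.']).mapM PySem.Int.ofChars?
  else none

def get_tag_from_build_info (current_build_info : List (String × List (String × List (List (String × String))))) : List Int :=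
  let tags := PySem.Dict.getD (PySem.Dict.mk (PySem.Dict.getD (PySem.Dict.mk current_build_info) "tags" [])) "tag" []
  tags.foldl (fun current_tag_name tag =>
    match PySem.Dict.get? (PySem.Dict.mk tag) "name" with
    | none => current_tag_name
    | some tag_name =>
      if tag_name ≠ "" ∧ PySem.Str.startswith tag_name "DIMRset_" then
        match pvParseVersion tag_name with
        | some parsed_version => parsed_version
        | none => current_tag_name
      else current_tag_name) [0, 0, 0]

-- ===== PORT B =====
-- the reversed early-exit loop of Source B
def pvFindRev : List (List (String × String)) → List Int
  | [] => [0, 0, 0]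
  | tag :: rest =>
    match PySem.Dict.get? (PySem.Dict.mk tag) "name" with
    | none => pvFindRev rest
    | some tag_name =>
      if tag_name ≠ "" ∧ PySem.Str.startswith tag_name "DIMRset_" then
        match pvParseVersion tag_name with
        | some parsed_version => parsed_version
        | none => pvFindRev rest
      else pvFindRev rest

def get_tag_from_build_info_alt (current_build_info : List (String × List (String × List (List (String × String))))) : List Int :=
  let tags := PySem.Dict.getD (PySem.Dict.mk (PySem.Dict.getD (PySem.Dict.mk current_build_info) "tags" [])) "tag" []
  pvFindRev tags.reverse

-- ===== PRECONDITION & SPEC =====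
def Spec_get_tag_from_build_info (current_build_info : List (String × List (String × List (List (String × String))))) (out : List Int) : Prop := out = get_tag_from_build_info_alt current_build_info
instance (current_build_info : List (String × List (String × List (List (String × String))))) (out : List Int) : Decidable (Spec_get_tag_from_build_info current_build_info out) := by unfold Spec_get_tag_from_build_info; infer_instance

-- ===== CLAIM (what is proved, stated in full; the proofs are below) =====
def Claim_equal_get_tag_from_build_info : Prop := ∀ (current_build_info : List (String × List (String × List (List (String × String))))), Dom_get_tag_from_build_info current_build_info → Spec_get_tag_from_build_info current_build_info (get_tag_from_build_info current_build_info)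

-- ===== LEMMAS AND PROOFS =====
-- One loop step as an Option: some v iff the tag's name passes the checks and parses to v.
def pvStep (tag : List (String × String)) : Option (List Int) :=
  match PySem.Dict.get? (PySem.Dict.mk tag) "name" with
  | none => none
  | some tag_name =>
    if tag_name ≠ "" ∧ PySem.Str.startswith tag_name "DIMRset_" then pvParseVersion tag_name
    else none

-- B's loop generalized over the fall-through value.
def pvAux : List (List (String × String)) → List Int → List Int
  | [], a => a
  | t :: r, a =>
    match pvStep t with
    | some v => v
    | none => pvAux r a

lemma pvFindRev_eq_aux (xs : List (List (String × String))) : pvFindRev xs = pvAux xs [0, 0, 0] := by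
  induction xs with
  | nil => rfl
  | cons t r ih =>
    simp only [pvFindRev, pvAux, pvStep]
    cases PySem.Dict.get? (PySem.Dict.mk t) "name" with
    | none => exact ih
    | some n =>
      dsimp only
      split
      next =>
        cases pvParseVersion n with
        | some v => rfl
        | none => exact ih
      next => exact ih

lemma pvAux_append (l1 l2 : List (List (String × String))) (a : List Int) :
    pvAux (l1 ++ l2) a = pvAux l1 (pvAux l2 a) := by
  induction l1 with
  | nil => rfl
  | cons t r ih =>
    simp only [List.cons_append, pvAux]
    cases pvStep t <;> simp [ih]

lemma pvFoldl_eq (xs : List (List (String × String))) (a : List Int) :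
    xs.foldl (fun current_tag_name tag =>
      match PySem.Dict.get? (PySem.Dict.mk tag) "name" with
      | none => current_tag_name
      | some tag_name =>
        if tag_name ≠ "" ∧ PySem.Str.startswith tag_name "DIMRset_" then
          match pvParseVersion tag_name with
          | some parsed_version => parsed_version
          | none => current_tag_name
        else current_tag_name) a = pvAux xs.reverse a := by
  induction xs generalizing a with
  | nil => rfl
  | cons t r ih =>
    simp only [List.foldl_cons, List.reverse_cons]
    rw [ih, pvAux_append]
    congr 1
    simp only [pvAux, pvStep]
    cases PySem.Dict.get? (PySem.Dict.mk t) "name" with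
    | none => rfl
    | some n =>
      dsimp only
      split
      next =>
        cases pvParseVersion n with
        | some v => rfl
        | none => rfl
      next => rfl

-- ===== VERDICT (by name: the statement is the Claim_ definition above) =====
theorem get_tag_from_build_info_spec : Claim_equal_get_tag_from_build_info := by
  intro cbi _
  unfold Spec_get_tag_from_build_info get_tag_from_build_info get_tag_from_build_info_alt
  rw [pvFoldl_eq, pvFindRev_eq_aux]
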